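-- pv_equiv track=rewrite | github.com/memcontext/ClawSync | api-server/app/core/coordinator.py | _find_common_slots
-- ===== SOURCE A (Python) =====
-- from typing import List, Dict, Any, Optional
--
-- def _find_common_slots(participants: List[Dict]) -> List[str]:
--     """
--     Simple common time slot finding algorithm (all slots are unified as string format)
--     In production, this should be handled by the LLM
--     """
--     if not participants:
--         return []
--
--     per_person_slots = []
--     for p in participants:
--         raw_slots = p.get('available_slots', [])
--         slot_set = {str(s) for s in raw_slots}
--         if slot_set:
--             per_person_slots.append(slot_set)
--
--     if not per_person_slots:
--         return []
--
--     # Intersect all participants' slots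
--     common = per_person_slots[0]
--     for s in per_person_slots[1:]:
--         common = common & s
--
--     return sorted(common) if common else []
-- ===== SOURCE B (Python) =====
-- def _find_common_slots(participants):
--     """One counting pass over participants + a filter, instead of repeated pairwise set intersections."""
--     n = 0
--     counts = {}
--     for p in participants:
--         distinct = dict.fromkeys(str(s) for s in p.get('available_slots', []))
--         if distinct:
--             n += 1
--             for s in distinct:
--                 counts[s] = counts.get(s, 0) + 1
--     if n == 0:
--         return []
--     return sorted(s for s, c in counts.items() if c == n)
-- ===== Notes on version B (the rewrite author's own statement) =====
-- stated objective: alternative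
-- what changed: Replaces the repeated pairwise set-intersection fold with a single counting pass (a frequency dict over each non-empty participant's distinct slots) followed by a filter keeping slots whose count equals the number of counted participants.
import Mathlib
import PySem

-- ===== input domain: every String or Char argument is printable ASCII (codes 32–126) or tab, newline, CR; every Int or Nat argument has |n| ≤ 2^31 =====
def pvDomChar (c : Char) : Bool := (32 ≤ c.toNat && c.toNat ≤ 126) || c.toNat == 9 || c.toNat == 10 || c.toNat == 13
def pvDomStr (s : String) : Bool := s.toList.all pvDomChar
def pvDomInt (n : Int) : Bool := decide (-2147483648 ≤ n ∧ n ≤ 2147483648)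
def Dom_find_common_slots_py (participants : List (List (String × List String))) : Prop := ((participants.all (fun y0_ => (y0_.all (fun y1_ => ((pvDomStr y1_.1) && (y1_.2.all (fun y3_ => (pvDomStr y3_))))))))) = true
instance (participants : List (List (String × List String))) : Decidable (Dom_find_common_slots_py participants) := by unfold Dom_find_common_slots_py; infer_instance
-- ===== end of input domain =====

-- B replaces A's repeated pairwise set intersections by one counting pass plus a filter (objective: alternative, same cost).

-- ===== PORT A =====
-- literal port of _find_common_slots: collect non-empty slot sets, fold set intersection, sort
def find_common_slots_py (participants : List (List (String × List String))) : List String :=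
  if participants = [] then []
  else
    let per_person_slots : List (PySem.Set String) := participants.foldl
      (fun acc p =>
        let raw_slots := (p.lookup "available_slots").getD []
        let slot_set : PySem.Set String := PySem.Set.ofList raw_slots   -- {str(s) for s in raw_slots}; str on str is identity
        if slot_set = [] then acc else acc ++ [slot_set]) []
    match per_person_slots with
    | [] => []
    | c0 :: rest =>
      let common := rest.foldl (fun c s => PySem.Set.inter c s) c0
      if common = [] then [] else PySem.List.sorted common (fun x => x) false

-- ===== PORT B =====
-- literal port of Source B: one pass keeping (n, counts); then filter counts == n and sort
def find_common_slots_py_alt (participants : List (List (String × List String))) : List String :=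
  let st := participants.foldl
    (fun (st : Int × PySem.Dict String Int) p =>
      let distinct := PySem.List.dedup ((p.lookup "available_slots").getD [])
      if distinct = [] then st
      else (st.1 + 1, distinct.foldl (fun d s => d.insert s (d.getD s 0 + 1)) st.2))
    (0, PySem.Dict.empty)
  if st.1 = 0 then []
  else PySem.List.sorted ((st.2.items.filter (fun kc => kc.2 == st.1)).map (fun kc => kc.1)) (fun x => x) false

-- ===== PRECONDITION & SPEC =====
def Spec_find_common_slots_py (participants : List (List (String × List String))) (out : List String) : Prop := out = find_common_slots_py_alt participants
instance (participants : List (List (String × List String))) (out : List String) : Decidable (Spec_find_common_slots_py participants out) := by unfold Spec_find_common_slots_py; infer_instance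

-- ===== CLAIM (what is proved, stated in full; the proofs are below) =====
def Claim_equal_find_common_slots_py : Prop := ∀ (participants : List (List (String × List String))), Dom_find_common_slots_py participants → Spec_find_common_slots_py participants (find_common_slots_py participants)

-- ===== LEMMAS AND PROOFS =====

-- the list of non-empty deduplicated slot sets, in participant order (shared description of both loops)
def pvSetsOf (participants : List (List (String × List String))) : List (List String) :=
  participants.filterMap (fun p =>
    let d := PySem.Set.ofList ((p.lookup "available_slots").getD [])
    if d = [] then none else some d)

theorem pvA_fold (participants : List (List (String × List String)))
    (acc : List (PySem.Set String)) :
    participants.foldl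
      (fun acc p =>
        let raw_slots := (p.lookup "available_slots").getD []
        let slot_set : PySem.Set String := PySem.Set.ofList raw_slots
        if slot_set = [] then acc else acc ++ [slot_set]) acc
      = acc ++ pvSetsOf participants := by
  induction participants generalizing acc with
  | nil => simp [pvSetsOf]
  | cons p ps ih =>
    simp only [List.foldl_cons, pvSetsOf, List.filterMap_cons]
    by_cases h : PySem.Set.ofList ((p.lookup "available_slots").getD []) = []
    · simp [h, ih, pvSetsOf]
    · simp [h, ih, pvSetsOf]

theorem pvB_fold (participants : List (List (String × List String)))
    (n : Int) (d : PySem.Dict String Int) :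
    participants.foldl
      (fun (st : Int × PySem.Dict String Int) p =>
        let distinct := PySem.List.dedup ((p.lookup "available_slots").getD [])
        if distinct = [] then st
        else (st.1 + 1, distinct.foldl (fun d s => d.insert s (d.getD s 0 + 1)) st.2))
      (n, d)
      = (n + ((pvSetsOf participants).length : Int),
         (pvSetsOf participants).flatten.foldl (fun d s => d.insert s (d.getD s 0 + 1)) d) := by
  induction participants generalizing n d with
  | nil => simp [pvSetsOf]
  | cons p ps ih =>
    rw [List.foldl_cons]
    by_cases h : PySem.Set.ofList ((p.lookup "available_slots").getD []) = []
    · have hstep : (let distinct := PySem.List.dedup ((p.lookup "available_slots").getD [])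
          if distinct = [] then (n, d)
          else ((n, d).1 + 1, List.foldl (fun d s => d.insert s (d.getD s 0 + 1)) (n, d).2 distinct))
          = (n, d) := by
        simp [PySem.List.dedup_eq_ofList, h]
      rw [hstep, ih]
      simp [pvSetsOf, h]
    · have hstep : (let distinct := PySem.List.dedup ((p.lookup "available_slots").getD [])
          if distinct = [] then (n, d)
          else ((n, d).1 + 1, List.foldl (fun d s => d.insert s (d.getD s 0 + 1)) (n, d).2 distinct))
          = (n + 1, (PySem.Set.ofList ((p.lookup "available_slots").getD [])).foldl
              (fun d s => d.insert s (d.getD s 0 + 1)) d) := by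
        simp [PySem.List.dedup_eq_ofList, h]
      rw [hstep, ih]
      simp [pvSetsOf, h, List.foldl_append, Prod.ext_iff]
      ring

theorem pvNodup_sets (participants : List (List (String × List String))) :
    ∀ s ∈ pvSetsOf participants, s.Nodup := by
  intro s hs
  simp only [pvSetsOf, List.mem_filterMap] at hs
  obtain ⟨p, _, hp⟩ := hs
  by_cases h : PySem.Set.ofList ((p.lookup "available_slots").getD []) = [] <;>
    simp [h] at hp
  exact hp ▸ PySem.Set.nodup_ofList _

theorem pvCount_flatten_le (sets : List (List String)) (h : ∀ s ∈ sets, s.Nodup) (k : String) :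
    sets.flatten.count k ≤ sets.length := by
  induction sets with
  | nil => simp
  | cons s rest ih =>
    simp only [List.flatten_cons, List.count_append, List.length_cons]
    have h1 : s.count k ≤ 1 := List.nodup_iff_count_le_one.mp (h s (by simp)) k
    have h2 := ih (fun t ht => h t (by simp [ht]))
    omega

theorem pvCount_flatten_eq_iff (sets : List (List String)) (h : ∀ s ∈ sets, s.Nodup) (k : String) :
    sets.flatten.count k = sets.length ↔ ∀ s ∈ sets, k ∈ s := by
  induction sets with
  | nil => simp
  | cons s rest ih =>
    simp only [List.flatten_cons, List.count_append, List.length_cons]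
    have h1 : s.count k ≤ 1 := List.nodup_iff_count_le_one.mp (h s (by simp)) k
    have h2 := pvCount_flatten_le rest (fun t ht => h t (by simp [ht])) k
    have h3 := ih (fun t ht => h t (by simp [ht]))
    constructor
    · intro he t ht
      rcases List.mem_cons.mp ht with rfl | ht'
      · exact List.count_pos_iff.mp (by omega)
      · have : rest.flatten.count k = rest.length := by omega
        exact h3.mp this t ht'
    · intro hall
      have hk : s.count k = 1 := List.count_eq_one_of_mem (h s (by simp)) (hall s (by simp))
      have : rest.flatten.count k = rest.length := h3.mpr (fun t ht => hall t (by simp [ht]))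
      omega

theorem pvInter_fold_mem (rest : List (PySem.Set String)) (c0 : PySem.Set String) (k : String) :
    k ∈ rest.foldl (fun c s => PySem.Set.inter c s) c0 ↔ k ∈ c0 ∧ ∀ s ∈ rest, k ∈ s := by
  induction rest generalizing c0 with
  | nil => simp
  | cons s rest ih =>
    simp only [List.foldl_cons, ih, PySem.Set.mem_inter, List.mem_cons]
    constructor
    · rintro ⟨⟨h1, h2⟩, h3⟩
      exact ⟨h1, fun t ht => by rcases ht with rfl | ht' <;> [exact h2; exact h3 t ht']⟩
    · rintro ⟨h1, h2⟩
      exact ⟨⟨h1, h2 s (by simp)⟩, fun t ht => h2 t (by simp [ht])⟩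

theorem pvInter_fold_nodup (rest : List (PySem.Set String)) (c0 : PySem.Set String)
    (h : c0.Nodup) : (rest.foldl (fun c s => PySem.Set.inter c s) c0).Nodup := by
  induction rest generalizing c0 with
  | nil => exact h
  | cons s rest ih =>
    simp only [List.foldl_cons]
    exact ih _ (PySem.Set.nodup_inter _ _ h)

theorem pvKeys_eq (flat : List String) (n : Int) :
    (((PySem.Dict.counter flat).items.filter (fun kc => kc.2 == n)).map (fun kc => kc.1))
      = (PySem.Set.ofList flat).filter (fun k => ((flat.count k : Int) == n)) := by
  rw [PySem.Dict.items_counter]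
  rw [List.filter_map, List.map_map]
  exact List.map_id _

-- ===== VERDICT (by name: the statement is the Claim_ definition above) =====
theorem find_common_slots_py_spec : Claim_equal_find_common_slots_py := by
  intro participants _
  unfold Spec_find_common_slots_py
  simp only [find_common_slots_py, find_common_slots_py_alt, pvA_fold, pvB_fold,
    List.nil_append, zero_add, PySem.Dict.foldl_insert_getD_add_one_eq_counter]
  have hnd := pvNodup_sets participants
  generalize hs : pvSetsOf participants = sets at *
  cases sets with
  | nil =>
    have h0 : ((List.length ([] : List (List String))) : Int) = 0 := by simp
    rw [if_pos h0]
    split <;> rfl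
  | cons c0 rest =>
    have hne : participants ≠ [] := by
      intro h; rw [h] at hs; simp [pvSetsOf] at hs
    rw [if_neg hne]
    have hlen : ¬ (((c0 :: rest).length : Int) = 0) := by
      simp only [List.length_cons]
      push_cast
      omega
    rw [if_neg hlen, pvKeys_eq]
    show (if List.foldl (fun c s => PySem.Set.inter c s) c0 rest = [] then []
        else PySem.List.sorted (List.foldl (fun c s => PySem.Set.inter c s) c0 rest)
          (fun x => x) false) = _
    set flat := (c0 :: rest).flatten with hflat
    set common := rest.foldl (fun c s => PySem.Set.inter c s) c0 with hcommon
    set keys := (PySem.Set.ofList flat).filter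
      (fun k => ((flat.count k : Int) == ((c0 :: rest).length : Int))) with hkeys
    have hmem : ∀ k, k ∈ common ↔ k ∈ keys := by
      intro k
      rw [hcommon, pvInter_fold_mem, hkeys, List.mem_filter]
      constructor
      · rintro ⟨h1, h2⟩
        have hall : ∀ s ∈ c0 :: rest, k ∈ s := by
          intro s hsmem
          rcases List.mem_cons.mp hsmem with rfl | h' <;> [exact h1; exact h2 _ h']
        refine ⟨(PySem.Set.mem_ofList flat k).mpr (List.mem_flatten.mpr ⟨c0, by simp, h1⟩), ?_⟩
        rw [beq_iff_eq]
        exact_mod_cast (pvCount_flatten_eq_iff (c0 :: rest) hnd k).mpr hall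
      · rintro ⟨_, h2⟩
        have hc : flat.count k = (c0 :: rest).length := by
          have := beq_iff_eq.mp h2
          exact_mod_cast this
        have hall := (pvCount_flatten_eq_iff (c0 :: rest) hnd k).mp hc
        exact ⟨hall c0 (by simp), fun s hsmem => hall s (by simp [hsmem])⟩
    have hperm : common.Perm keys := by
      refine (List.perm_ext_iff_of_nodup ?_ ?_).mpr hmem
      · exact pvInter_fold_nodup rest c0 (hnd c0 (by simp))
      · exact (PySem.Set.nodup_ofList flat).filter _
    by_cases hc : common = []
    · have hk : keys = [] := ((hc ▸ hperm).symm).eq_nil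
      rw [if_pos hc, hk]
      rfl
    · rw [if_neg hc]
      exact PySem.List.sorted_eq_sorted_of_perm common keys (fun x => x)
        (fun a b h => h) hperm
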